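-- pv_equiv track=rewrite | github.com/kennyfh/kennyfh.github.io | generate_publications.py | get_publication_source
-- ===== SOURCE A (Python) =====
-- def get_publication_source(entry):
--     """Obtiene la fuente principal de la publicación (journal, booktitle, etc.)."""
--     entry_type = entry.get("ENTRYTYPE", "").lower()
--     source_fields = {
--         "article": "journal", "inproceedings": "booktitle", "conference": "booktitle",
--         "book": "publisher", "inbook": "booktitle", "incollection": "booktitle",
--         "techreport": "institution", "phdthesis": "school", "mastersthesis": "school",
--         "misc": "howpublished",
--     }
--     field = source_fields.get(entry_type)
--     source = entry.get(field, "") if field else ""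
--     if not source:
--         for fallback in ("journal", "booktitle", "publisher", "school", "institution", "howpublished", "note"):
--             source = entry.get(fallback, "")
--             if source: break
--     return source
-- ===== SOURCE B (Python) =====
-- def get_publication_source(entry):
--     """Obtiene la fuente principal de la publicación (journal, booktitle, etc.)."""
--     source_fields = {
--         "article": "journal", "inproceedings": "booktitle", "conference": "booktitle",
--         "book": "publisher", "inbook": "booktitle", "incollection": "booktitle",
--         "techreport": "institution", "phdthesis": "school", "mastersthesis": "school",
--         "misc": "howpublished",
--     }
--     fallbacks = ("journal", "booktitle", "publisher", "school", "institution", "howpublished", "note")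
--     primary = source_fields.get(entry.get("ENTRYTYPE", "").lower())
--     # priority rank per source field: the mapped primary field wins, others keep
--     # their fallback position; then ONE pass over the entry picks the best-ranked
--     # truthy field instead of looking candidate names up one by one.
--     rank = {name: i + 1 for i, name in enumerate(fallbacks)}
--     if primary:
--         rank[primary] = 0
--     best = None
--     for key, value in entry.items():
--         if value:
--             r = rank.get(key)
--             if r is not None:
--                 if best is None or r < best[0]:
--                     best = (r, value)
--     return best[1] if best else ""
-- ===== Notes on version B (the rewrite author's own statement) =====
-- stated objective: alternative
-- what changed: B inverts the traversal: instead of A's candidate-by-candidate dict lookups (guarded primary lookup, then a fallback loop of entry.get calls), B builds a priority-rank table for the source fields once and makes a single argmin pass over the entry's own items, keeping the best-ranked truthy field.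
import Mathlib
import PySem

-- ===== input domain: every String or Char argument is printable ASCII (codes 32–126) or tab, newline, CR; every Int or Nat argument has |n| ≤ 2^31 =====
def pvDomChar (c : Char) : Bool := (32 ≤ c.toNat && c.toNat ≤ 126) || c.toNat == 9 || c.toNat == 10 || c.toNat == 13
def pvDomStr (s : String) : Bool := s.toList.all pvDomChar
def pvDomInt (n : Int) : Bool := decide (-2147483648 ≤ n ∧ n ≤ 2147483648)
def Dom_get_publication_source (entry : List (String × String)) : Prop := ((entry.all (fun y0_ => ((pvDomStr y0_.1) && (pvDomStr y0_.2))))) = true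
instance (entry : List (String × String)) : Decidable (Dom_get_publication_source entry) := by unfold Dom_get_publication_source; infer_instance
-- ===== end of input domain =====

-- B replaces A's candidate-by-candidate dict lookups (guarded primary lookup, then a
-- fallback loop of lookups) by ONE pass over the entry's items that keeps the
-- best-priority-ranked truthy field (an argmin scan); objective: alternative.

-- shared literal constants of both Pythons (the type→field table and the fallback tuple)
def pvSourceFields : PySem.Dict String String := PySem.Dict.mk
  [("article", "journal"), ("inproceedings", "booktitle"), ("conference", "booktitle"),
   ("book", "publisher"), ("inbook", "booktitle"), ("incollection", "booktitle"),
   ("techreport", "institution"), ("phdthesis", "school"), ("mastersthesis", "school"),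
   ("misc", "howpublished")]

def pvFallbacks : List String :=
  ["journal", "booktitle", "publisher", "school", "institution", "howpublished", "note"]

-- ===== PORT A =====
-- A's fallback for-loop with break: 'source = entry.get(fallback, ""); if source: break'
def pvAFallbackLoop (entry : List (String × String)) : List String → String → String
  | [], source => source
  | f :: rest, _ =>
      let source := PySem.Dict.getD (PySem.Dict.mk entry) f ""
      if source ≠ "" then source else pvAFallbackLoop entry rest source

def get_publication_source (entry : List (String × String)) : String :=
  let entry_type := PySem.Str.lower (PySem.Dict.getD (PySem.Dict.mk entry) "ENTRYTYPE" "")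
  let field := PySem.Dict.get? pvSourceFields entry_type
  let source := match field with
    | some f => PySem.Dict.getD (PySem.Dict.mk entry) f ""
    | none => ""
  if source = "" then pvAFallbackLoop entry pvFallbacks source else source

-- ===== PORT B =====
-- B's loop body: 'if value: r = rank.get(key); if r is not None: if best is None or r < best[0]: best = (r, value)'
def pvBestStep (rank : PySem.Dict String Int) (best : Option (Int × String)) (kv : String × String) :
    Option (Int × String) :=
  if kv.2 ≠ "" then
    match PySem.Dict.get? rank kv.1 with
    | some r => if (match best with | none => true | some b => decide (r < b.1)) then some (r, kv.2) else best
    | none => best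
  else best

def get_publication_source_alt (entry : List (String × String)) : String :=
  let primary := PySem.Dict.get? pvSourceFields
    (PySem.Str.lower (PySem.Dict.getD (PySem.Dict.mk entry) "ENTRYTYPE" ""))
  -- rank = {name: i + 1 for i, name in enumerate(fallbacks)}; if primary: rank[primary] = 0
  let rank0 : PySem.Dict String Int :=
    PySem.Dict.mk ((PySem.List.enumerate pvFallbacks).map (fun p => (p.2, p.1 + 1)))
  let rank := match primary with
    | some p => if p ≠ "" then PySem.Dict.insert rank0 p 0 else rank0
    | none => rank0
  let best := entry.foldl (pvBestStep rank) none
  match best with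
  | some b => b.2
  | none => ""

-- ===== PRECONDITION & SPEC =====
-- Pre_ excludes association lists with duplicate keys: they represent no Python dict
-- (the argument is a dict), so first-vs-last occurrence behaviour there is accidental.
def Pre_get_publication_source (entry : List (String × String)) : Prop :=
  (entry.map Prod.fst).Nodup
instance (entry : List (String × String)) : Decidable (Pre_get_publication_source entry) := by
  unfold Pre_get_publication_source; infer_instance

def pvWitness_get_publication_source : (List (String × String)) :=
  [("ENTRYTYPE", "article"), ("journal", "Nature"), ("note", "n")]

def Spec_get_publication_source (entry : List (String × String)) (out : String) : Prop := out = get_publication_source_alt entry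
instance (entry : List (String × String)) (out : String) : Decidable (Spec_get_publication_source entry out) := by unfold Spec_get_publication_source; infer_instance

-- ===== CLAIM (what is proved, stated in full; the proofs are below) =====
def Claim_equal_get_publication_source : Prop := ∀ (entry : List (String × String)), Dom_get_publication_source entry → Pre_get_publication_source entry → Spec_get_publication_source entry (get_publication_source entry)

-- ===== LEMMAS AND PROOFS =====

def pvVals (entry : List (String × String)) (n : String) : String :=
  PySem.Dict.getD (PySem.Dict.mk entry) n ""
def pvMinStep (b : Option (Int × String)) (p : Int × String) : Option (Int × String) :=
  if (match b with | none => true | some q => decide (p.1 < q.1)) then some p else b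
def pvG (rank : PySem.Dict String Int) (kv : String × String) : Option (Int × String) :=
  if kv.2 ≠ "" then (PySem.Dict.get? rank kv.1).map (fun r => (r, kv.2)) else none
def pvH (entry : List (String × String)) (nr : String × Int) : Option (Int × String) :=
  if pvVals entry nr.1 ≠ "" then some (nr.2, pvVals entry nr.1) else none
def pvFT (entry : List (String × String)) : List String → String
  | [] => ""
  | c :: rest => if pvVals entry c ≠ "" then pvVals entry c else pvFT entry rest

theorem pvL1 (rank : PySem.Dict String Int) (l : List (String × String)) :
    ∀ b, l.foldl (pvBestStep rank) b = (l.filterMap (pvG rank)).foldl pvMinStep b := by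
  induction l with
  | nil => intro b; rfl
  | cons kv rest ih =>
      intro b
      by_cases h : kv.2 = ""
      · simp [pvBestStep, pvG, h, ih]
      · cases hr : PySem.Dict.get? rank kv.1 with
        | none => simp [pvBestStep, pvG, h, hr, ih]
        | some r => simp [pvBestStep, pvG, pvMinStep, h, hr, ih]


theorem pvMinStep_none (p : Int × String) : pvMinStep none p = some p := rfl
theorem pvMinStep_some (q p : Int × String) :
    pvMinStep (some q) p = if p.1 < q.1 then some p else some q := by
  simp [pvMinStep]

theorem pvFoldChar (l : List (Int × String)) :
    ∀ q, ∃ p, l.foldl pvMinStep (some q) = some p ∧ (p = q ∨ p ∈ l) ∧ p.1 ≤ q.1 ∧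
      ∀ r ∈ l, p.1 ≤ r.1 := by
  induction l with
  | nil => intro q; exact ⟨q, rfl, Or.inl rfl, le_refl _, by simp⟩
  | cons x t ih =>
      intro q
      by_cases hx : x.1 < q.1
      · obtain ⟨p, h1, h2, h3, h4⟩ := ih x
        refine ⟨p, ?_, ?_, ?_, ?_⟩
        · simpa [pvMinStep_some, hx] using h1
        · rcases h2 with rfl | h2
          · exact Or.inr (List.mem_cons_self)
          · exact Or.inr (List.mem_cons_of_mem _ h2)
        · omega
        · intro r hr
          rcases List.mem_cons.mp hr with rfl | hr
          · exact h3
          · exact h4 r hr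
      · obtain ⟨p, h1, h2, h3, h4⟩ := ih q
        refine ⟨p, ?_, ?_, h3, ?_⟩
        · simpa [pvMinStep_some, hx] using h1
        · rcases h2 with rfl | h2
          · exact Or.inl rfl
          · exact Or.inr (List.mem_cons_of_mem _ h2)
        · intro r hr
          rcases List.mem_cons.mp hr with rfl | hr
          · omega
          · exact h4 r hr

theorem pvFoldNoneChar (l : List (Int × String)) (h : l ≠ []) :
    ∃ p, l.foldl pvMinStep none = some p ∧ p ∈ l ∧ ∀ r ∈ l, p.1 ≤ r.1 := by
  cases l with
  | nil => exact absurd rfl h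
  | cons x t =>
      obtain ⟨p, h1, h2, h3, h4⟩ := pvFoldChar t x
      refine ⟨p, ?_, ?_, ?_⟩
      · simpa [pvMinStep_none] using h1
      · rcases h2 with rfl | h2
        · exact List.mem_cons_self
        · exact List.mem_cons_of_mem _ h2
      · intro r hr
        rcases List.mem_cons.mp hr with rfl | hr
        · exact h3
        · exact h4 r hr


theorem pvL5 (l₁ l₂ : List (Int × String)) (hp : l₁.Perm l₂)
    (hn : (l₁.map Prod.fst).Nodup) :
    l₁.foldl pvMinStep none = l₂.foldl pvMinStep none := by
  rcases eq_or_ne l₁ [] with rfl | h1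
  · rw [hp.nil_eq.symm]
  · have h2 : l₂ ≠ [] := fun h => h1 (List.Perm.eq_nil (h ▸ hp))
    obtain ⟨p, hp1, hp2, hp3⟩ := pvFoldNoneChar l₁ h1
    obtain ⟨q, hq1, hq2, hq3⟩ := pvFoldNoneChar l₂ h2
    have hq2' : q ∈ l₁ := hp.mem_iff.mpr hq2
    have hpq : p.1 = q.1 := le_antisymm (hp3 q hq2') (hq3 p (hp.mem_iff.mp hp2))
    have : p = q := List.inj_on_of_nodup_map hn hp2 hq2' hpq
    rw [hp1, hq1, this]

theorem pvRankInj (rank : PySem.Dict String Int) (hv : (rank.items.map Prod.snd).Nodup) {k k' : String} {r : Int}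
    (h1 : PySem.Dict.get? rank k = some r) (h2 : PySem.Dict.get? rank k' = some r) : k = k' := by
  have m1 := PySem.Dict.mem_items_of_get?_eq_some _ h1
  have m2 := PySem.Dict.mem_items_of_get?_eq_some _ h2
  have := List.inj_on_of_nodup_map hv m1 m2 rfl
  exact congrArg Prod.fst this

theorem pvValsNe (entry : List (String × String)) (n : String) :
    pvVals entry n ≠ "" ↔ ∃ v, PySem.Dict.get? (PySem.Dict.mk entry) n = some v ∧ v ≠ "" := by
  unfold pvVals
  rw [PySem.Dict.getD_eq_get?_getD]
  cases h : PySem.Dict.get? (PySem.Dict.mk entry) n <;> simp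

theorem pvValsOf (entry : List (String × String)) {n v : String}
    (h : PySem.Dict.get? (PySem.Dict.mk entry) n = some v) : pvVals entry n = v := by
  unfold pvVals
  rw [PySem.Dict.getD_eq_get?_getD, h]; rfl

theorem pvMemG (rank : PySem.Dict String Int) (entry : List (String × String))
    (hk : (entry.map Prod.fst).Nodup) (p : Int × String) :
    p ∈ entry.filterMap (pvG rank) ↔
      ∃ n, PySem.Dict.get? rank n = some p.1 ∧ pvVals entry n = p.2 ∧ p.2 ≠ "" := by
  rw [List.mem_filterMap]
  constructor
  · rintro ⟨kv, hm, hg⟩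
    unfold pvG at hg
    split at hg
    · next hne =>
        rcases hr : PySem.Dict.get? rank kv.1 with _ | r
        · simp [hr] at hg
        · simp [hr] at hg
          subst hg
          have : PySem.Dict.get? (PySem.Dict.mk entry) kv.1 = some kv.2 := by
            exact (PySem.Dict.get?_eq_some_iff_mem_items _ _ _ (by simpa using hk)).mpr hm
          exact ⟨kv.1, hr, pvValsOf entry this, hne⟩
    · exact absurd hg (by simp)
  · rintro ⟨n, hr, hvv, hne⟩
    have hv' : pvVals entry n ≠ "" := hvv ▸ hne
    obtain ⟨v, hget, hvne⟩ := (pvValsNe entry n).mp hv'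
    have hv2 : v = p.2 := by rw [← hvv, pvValsOf entry hget]
    refine ⟨(n, v), ?_, ?_⟩
    · exact (PySem.Dict.get?_eq_some_iff_mem_items _ _ _ (by simpa using hk)).mp hget
    · simp [pvG, hr, hv2, hne]

theorem pvMemH (entry : List (String × String)) (rank : PySem.Dict String Int)
    (hrk : rank.keys.Nodup) (p : Int × String) :
    p ∈ rank.items.filterMap (pvH entry) ↔
      ∃ n, PySem.Dict.get? rank n = some p.1 ∧ pvVals entry n = p.2 ∧ p.2 ≠ "" := by
  rw [List.mem_filterMap]
  constructor
  · rintro ⟨nr, hm, hh⟩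
    unfold pvH at hh
    split at hh
    · next hne =>
        simp at hh
        subst hh
        have hma : (nr.1, nr.2) ∈ rank.items := hm
        exact ⟨nr.1, (PySem.Dict.get?_eq_some_iff_mem_items _ _ _ hrk).mpr hma, rfl, hne⟩
    · exact absurd hh (by simp)
  · rintro ⟨n, hr, hvv, hne⟩
    refine ⟨(n, p.1), (PySem.Dict.get?_eq_some_iff_mem_items _ _ _ hrk).mp hr, ?_⟩
    simp [pvH, hvv, hne]

theorem pvG_eq_some_iff (rank : PySem.Dict String Int) (kv : String × String) (p : Int × String) :
    pvG rank kv = some p ↔ kv.2 ≠ "" ∧ PySem.Dict.get? rank kv.1 = some p.1 ∧ p.2 = kv.2 := by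
  unfold pvG
  split
  · next hne =>
      cases hr : PySem.Dict.get? rank kv.1 with
      | none => simp [hne]
      | some r =>
          simp [hne]
          constructor
          · rintro rfl; exact ⟨rfl, rfl⟩
          · rintro ⟨h1, h2⟩; cases p; simp_all
  · next hne => simp at hne; simp [hne]

theorem pvH_eq_some_iff (entry : List (String × String)) (nr : String × Int) (p : Int × String) :
    pvH entry nr = some p ↔ pvVals entry nr.1 ≠ "" ∧ p = (nr.2, pvVals entry nr.1) := by
  unfold pvH
  split
  · next hne => simp [hne, eq_comm]
  · next hne => simp at hne; simp [hne]

theorem pvL7 (entry : List (String × String)) (rank : PySem.Dict String Int)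
    (hk : (entry.map Prod.fst).Nodup) (hrv : (rank.items.map Prod.snd).Nodup) :
    ((entry.filterMap (pvG rank)).map Prod.fst).Nodup := by
  rw [List.Nodup, List.pairwise_map]
  apply List.Pairwise.filterMap (S := fun p q : Int × String => p.1 ≠ q.1)
      (R := fun a b : String × String => a.1 ≠ b.1)
  · intro kv kv' hne p hp p' hp'
    have h1 := (pvG_eq_some_iff rank kv p).mp hp
    have h2 := (pvG_eq_some_iff rank kv' p').mp hp'
    intro hEq
    exact hne (pvRankInj rank hrv h1.2.1 (hEq ▸ h2.2.1))
  · rw [List.Nodup, List.pairwise_map] at hk; exact hk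

theorem pvL10 (entry : List (String × String)) (items : List (String × Int))
    (hv : (items.map Prod.snd).Nodup) :
    ((items.filterMap (pvH entry)).map Prod.fst).Nodup := by
  rw [List.Nodup, List.pairwise_map]
  apply List.Pairwise.filterMap (S := fun p q : Int × String => p.1 ≠ q.1)
      (R := fun a b : String × Int => a.2 ≠ b.2)
  · intro nr nr' hne p hp p' hp'
    have h1 := (pvH_eq_some_iff entry nr p).mp hp
    have h2 := (pvH_eq_some_iff entry nr' p').mp hp'
    rw [h1.2, h2.2]
    exact hne
  · rw [List.Nodup, List.pairwise_map] at hv; exact hv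

theorem pvL6 (entry : List (String × String)) (rank : PySem.Dict String Int)
    (hk : (entry.map Prod.fst).Nodup) (hrk : rank.keys.Nodup)
    (hrv : (rank.items.map Prod.snd).Nodup) :
    (entry.filterMap (pvG rank)).Perm (rank.items.filterMap (pvH entry)) := by
  apply (List.perm_ext_iff_of_nodup ?_ ?_).mpr
  · intro p
    rw [pvMemG rank entry hk p, pvMemH entry rank hrk p]
  · exact List.Nodup.of_map _ (pvL7 entry rank hk hrv)
  · exact List.Nodup.of_map _ (pvL10 entry rank.items hrv)

theorem pvFoldKeep (l : List (Int × String)) :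
    ∀ p, (∀ q ∈ l, ¬(q.1 < p.1)) → l.foldl pvMinStep (some p) = some p := by
  induction l with
  | nil => intro p _; rfl
  | cons x t ih =>
      intro p hq
      have hx : ¬(x.1 < p.1) := hq x List.mem_cons_self
      rw [List.foldl_cons, pvMinStep_some, if_neg hx]
      exact ih p (fun q hq' => hq q (List.mem_cons_of_mem _ hq'))

theorem pvL8 (entry : List (String × String)) (items : List (String × Int))
    (hs : (items.map Prod.snd).Pairwise (· < ·)) :
    (match (items.filterMap (pvH entry)).foldl pvMinStep none with
     | some b => b.2 | none => "") = pvFT entry (items.map Prod.fst) := by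
  induction items with
  | nil => rfl
  | cons nr t ih =>
      rw [List.map_cons, List.pairwise_cons] at hs
      by_cases hv : pvVals entry nr.1 = ""
      · have h0 : pvH entry nr = none := by simp [pvH, hv]
        rw [List.filterMap_cons, h0, List.map_cons]
        rw [ih hs.2]
        simp [pvFT, hv]
      · have h0 : pvH entry nr = some (nr.2, pvVals entry nr.1) := by simp [pvH, hv]
        rw [List.filterMap_cons, h0, List.map_cons]
        have hkeep : (t.filterMap (pvH entry)).foldl pvMinStep (some (nr.2, pvVals entry nr.1))
            = some (nr.2, pvVals entry nr.1) := by
          apply pvFoldKeep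
          intro q hq
          obtain ⟨nr', hm', hh'⟩ := List.mem_filterMap.mp hq
          have := (pvH_eq_some_iff entry nr' q).mp hh'
          have hlt : nr.2 < nr'.2 := hs.1 nr'.2 (List.mem_map_of_mem hm')
          rw [this.2]
          simp
          omega
        rw [List.foldl_cons, pvMinStep_none, hkeep]
        simp [pvFT, hv]

theorem pvL9 (entry : List (String × String)) :
    ∀ l : List String, pvAFallbackLoop entry l "" = pvFT entry l := by
  intro l
  induction l with
  | nil => rfl
  | cons f rest ih =>
      by_cases h : PySem.Dict.getD (PySem.Dict.mk entry) f "" = ""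
      · simp [pvAFallbackLoop, pvFT, pvVals, h, ih]
      · simp [pvAFallbackLoop, pvFT, pvVals, h]

theorem pvL11 (entry : List (String × String)) (x : String) (l1 l2 : List String) :
    pvFT entry (x :: (l1 ++ x :: l2)) = pvFT entry (x :: (l1 ++ l2)) := by
  by_cases hx : pvVals entry x = ""
  · simp only [pvFT, hx, ne_eq, not_true_eq_false, if_false]
    induction l1 with
    | nil => simp [pvFT, hx]
    | cons c t ih => simp [pvFT, ih]
  · simp [pvFT, hx]

theorem pvMain (entry : List (String × String)) (hk : (entry.map Prod.fst).Nodup)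
    (rank : PySem.Dict String Int) (srt : List (String × Int))
    (hperm : rank.items.Perm srt)
    (hrk : rank.keys.Nodup) (hrv : (rank.items.map Prod.snd).Nodup)
    (hs : (srt.map Prod.snd).Pairwise (· < ·)) :
    (match entry.foldl (pvBestStep rank) none with | some b => b.2 | none => "")
      = pvFT entry (srt.map Prod.fst) := by
  rw [pvL1 rank entry none,
      pvL5 _ _ (pvL6 entry rank hk hrk hrv) (pvL7 entry rank hk hrv),
      pvL5 _ _ (hperm.filterMap (pvH entry)) (pvL10 entry rank.items hrv)]
  exact pvL8 entry srt hs

theorem pvCase (entry : List (String × String)) (hk : (entry.map Prod.fst).Nodup)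
    (f : String) (l1 l2 : List String) (rank : PySem.Dict String Int) (srt : List (String × Int))
    (h1 : pvFallbacks = l1 ++ f :: l2)
    (h2 : srt.map Prod.fst = f :: (l1 ++ l2))
    (hperm : rank.items.Perm srt)
    (hrk : rank.keys.Nodup) (hrv : (rank.items.map Prod.snd).Nodup)
    (hs : (srt.map Prod.snd).Pairwise (· < ·)) :
    (if PySem.Dict.getD (PySem.Dict.mk entry) f "" = ""
      then pvAFallbackLoop entry pvFallbacks (PySem.Dict.getD (PySem.Dict.mk entry) f "")
      else PySem.Dict.getD (PySem.Dict.mk entry) f "")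
      = (match entry.foldl (pvBestStep rank) none with | some b => b.2 | none => "") := by
  rw [pvMain entry hk rank srt hperm hrk hrv hs, h2, ← pvL11 entry f l1 l2, ← h1]
  by_cases h : PySem.Dict.getD (PySem.Dict.mk entry) f "" = ""
  · rw [if_pos h, h, pvL9]
    simp [pvFT, pvVals, h]
  · rw [if_neg h]
    simp [pvFT, pvVals, h]

-- rank0 of both ports' rank construction, named for the proofs
def pvRank0 : PySem.Dict String Int :=
  PySem.Dict.mk ((PySem.List.enumerate pvFallbacks).map (fun p => (p.2, p.1 + 1)))

-- ===== VERDICT (by name: the statement is the Claim_ definition above) =====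
theorem get_publication_source_spec : Claim_equal_get_publication_source := by
  intro entry _ hpre
  unfold Spec_get_publication_source get_publication_source get_publication_source_alt
  have hk : (entry.map Prod.fst).Nodup := hpre
  cases hp : PySem.Dict.get? pvSourceFields
      (PySem.Str.lower (PySem.Dict.getD (PySem.Dict.mk entry) "ENTRYTYPE" "")) with
  | none =>
      simp only [hp, if_true]
      rw [pvL9]
      exact (pvMain entry hk pvRank0 pvRank0.items (List.Perm.refl _)
        (by decide) (by decide) (by decide)).symm
  | some f =>
      simp only [hp]
      have hm := PySem.Dict.mem_items_of_get?_eq_some _ hp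
      simp [pvSourceFields] at hm
      obtain ⟨-, rfl⟩ | ⟨-, rfl⟩ | ⟨-, rfl⟩ | ⟨-, rfl⟩ | ⟨-, rfl⟩ | ⟨-, rfl⟩ | ⟨-, rfl⟩ | ⟨-, rfl⟩ | ⟨-, rfl⟩ | ⟨-, rfl⟩ := hm
      · exact pvCase entry hk "journal" [] ["booktitle", "publisher", "school", "institution", "howpublished", "note"] (PySem.Dict.insert pvRank0 "journal" 0)
          [("journal", 0), ("booktitle", 2), ("publisher", 3), ("school", 4), ("institution", 5), ("howpublished", 6), ("note", 7)]
          (by decide) (by decide) (by decide) (by decide) (by decide) (by decide)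
      · exact pvCase entry hk "booktitle" ["journal"] ["publisher", "school", "institution", "howpublished", "note"] (PySem.Dict.insert pvRank0 "booktitle" 0)
          [("booktitle", 0), ("journal", 1), ("publisher", 3), ("school", 4), ("institution", 5), ("howpublished", 6), ("note", 7)]
          (by decide) (by decide) (by decide) (by decide) (by decide) (by decide)
      · exact pvCase entry hk "booktitle" ["journal"] ["publisher", "school", "institution", "howpublished", "note"] (PySem.Dict.insert pvRank0 "booktitle" 0)
          [("booktitle", 0), ("journal", 1), ("publisher", 3), ("school", 4), ("institution", 5), ("howpublished", 6), ("note", 7)]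
          (by decide) (by decide) (by decide) (by decide) (by decide) (by decide)
      · exact pvCase entry hk "publisher" ["journal", "booktitle"] ["school", "institution", "howpublished", "note"] (PySem.Dict.insert pvRank0 "publisher" 0)
          [("publisher", 0), ("journal", 1), ("booktitle", 2), ("school", 4), ("institution", 5), ("howpublished", 6), ("note", 7)]
          (by decide) (by decide) (by decide) (by decide) (by decide) (by decide)
      · exact pvCase entry hk "booktitle" ["journal"] ["publisher", "school", "institution", "howpublished", "note"] (PySem.Dict.insert pvRank0 "booktitle" 0)
          [("booktitle", 0), ("journal", 1), ("publisher", 3), ("school", 4), ("institution", 5), ("howpublished", 6), ("note", 7)]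
          (by decide) (by decide) (by decide) (by decide) (by decide) (by decide)
      · exact pvCase entry hk "booktitle" ["journal"] ["publisher", "school", "institution", "howpublished", "note"] (PySem.Dict.insert pvRank0 "booktitle" 0)
          [("booktitle", 0), ("journal", 1), ("publisher", 3), ("school", 4), ("institution", 5), ("howpublished", 6), ("note", 7)]
          (by decide) (by decide) (by decide) (by decide) (by decide) (by decide)
      · exact pvCase entry hk "institution" ["journal", "booktitle", "publisher", "school"] ["howpublished", "note"] (PySem.Dict.insert pvRank0 "institution" 0)
          [("institution", 0), ("journal", 1), ("booktitle", 2), ("publisher", 3), ("school", 4), ("howpublished", 6), ("note", 7)]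
          (by decide) (by decide) (by decide) (by decide) (by decide) (by decide)
      · exact pvCase entry hk "school" ["journal", "booktitle", "publisher"] ["institution", "howpublished", "note"] (PySem.Dict.insert pvRank0 "school" 0)
          [("school", 0), ("journal", 1), ("booktitle", 2), ("publisher", 3), ("institution", 5), ("howpublished", 6), ("note", 7)]
          (by decide) (by decide) (by decide) (by decide) (by decide) (by decide)
      · exact pvCase entry hk "school" ["journal", "booktitle", "publisher"] ["institution", "howpublished", "note"] (PySem.Dict.insert pvRank0 "school" 0)
          [("school", 0), ("journal", 1), ("booktitle", 2), ("publisher", 3), ("institution", 5), ("howpublished", 6), ("note", 7)]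
          (by decide) (by decide) (by decide) (by decide) (by decide) (by decide)
      · exact pvCase entry hk "howpublished" ["journal", "booktitle", "publisher", "school", "institution"] ["note"] (PySem.Dict.insert pvRank0 "howpublished" 0)
          [("howpublished", 0), ("journal", 1), ("booktitle", 2), ("publisher", 3), ("school", 4), ("institution", 5), ("note", 7)]
          (by decide) (by decide) (by decide) (by decide) (by decide) (by decide)
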